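-- pv_equiv track=rewrite | github.com/haheun703-stack/- | src/use_cases/nationality_signal.py | _detect_consecutive
-- ===== SOURCE A (Python) =====
-- def _detect_consecutive(vols: list[int]) -> int:
--     """거래량 연속 증가/감소 일수. 양수=연속증가, 음수=연속감소."""
--     if len(vols) < 2:
--         return 0
--
--     consecutive = 0
--     for i in range(len(vols) - 1, 0, -1):
--         if vols[i] > vols[i - 1]:
--             if consecutive >= 0:
--                 consecutive += 1
--             else:
--                 break
--         elif vols[i] < vols[i - 1]:
--             if consecutive <= 0:
--                 consecutive -= 1
--             else:
--                 break
--         else: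
--             break
--
--     return consecutive
-- ===== SOURCE B (Python) =====
-- def _detect_consecutive(vols: list[int]) -> int:
--     """거래량 연속 증가/감소 일수. 양수=연속증가, 음수=연속감소."""
--     run, prev = 0, 0
--     for a, b in zip(vols, vols[1:]):
--         s = (a < b) - (b < a)
--         run = run + 1 if (s == prev and s != 0) else (1 if s != 0 else 0)
--         prev = s
--     return run * prev
-- ===== Notes on version B (the rewrite author's own statement) =====
-- stated objective: alternative
-- what changed: Replaces A's backward scan with breaks and a signed accumulator by a single FORWARD pass over adjacent pairs (zip) that maintains a reset-on-sign-change run counter and the last pair's sign, returning run*sign.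
import Mathlib
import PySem

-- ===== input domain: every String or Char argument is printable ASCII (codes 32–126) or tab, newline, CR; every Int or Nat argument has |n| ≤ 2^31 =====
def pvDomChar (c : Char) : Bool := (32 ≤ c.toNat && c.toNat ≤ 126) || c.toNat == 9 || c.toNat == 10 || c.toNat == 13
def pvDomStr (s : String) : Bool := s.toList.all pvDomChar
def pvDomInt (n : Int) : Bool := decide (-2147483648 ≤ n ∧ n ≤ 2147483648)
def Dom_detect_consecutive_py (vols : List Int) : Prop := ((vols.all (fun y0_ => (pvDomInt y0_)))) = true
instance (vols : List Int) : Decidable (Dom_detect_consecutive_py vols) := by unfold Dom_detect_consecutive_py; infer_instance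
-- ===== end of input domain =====

-- B replaces A's backward break-scan by a forward reset-counter pass over adjacent pairs;
-- same O(n) cost, a genuinely different traversal order (alternative decomposition).


-- ===== PORT A =====
-- 'for i in range(len(vols)-1, 0, -1)' with break, ported as downward recursion on i;
-- all indices are in range (1 ≤ i ≤ len-1), so getD's default is never used.
def loopA (vols : List Int) : Nat → Int → Int
  | 0, c => c
  | i + 1, c =>
    if vols.getD (i + 1) 0 > vols.getD i 0 then
      (if 0 ≤ c then loopA vols i (c + 1) else c)
    else if vols.getD (i + 1) 0 < vols.getD i 0 then
      (if c ≤ 0 then loopA vols i (c - 1) else c)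
    else c

def detect_consecutive_py (vols : List Int) : Int :=
  if vols.length < 2 then 0
  else loopA vols (vols.length - 1) 0

-- ===== PORT B =====
-- Source B's loop body: s = (a < b) - (b < a); run resets unless s equals prev and is nonzero.
def stepB (st : Int × Int) (p : Int × Int) : Int × Int :=
  let s : Int := (if p.1 < p.2 then 1 else 0) - (if p.2 < p.1 then 1 else 0)
  (if s = st.2 ∧ s ≠ 0 then st.1 + 1 else if s ≠ 0 then 1 else 0, s)

-- 'zip(vols, vols[1:])' is vols.zip (vols.drop 1) (Python's [1:] = drop 1; zip truncates).
def detect_consecutive_py_alt (vols : List Int) : Int :=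
  let st := (vols.zip (vols.drop 1)).foldl stepB (0, 0)
  st.1 * st.2

-- ===== PRECONDITION & SPEC =====
def Spec_detect_consecutive_py (vols : List Int) (out : Int) : Prop := out = detect_consecutive_py_alt vols
instance (vols : List Int) (out : Int) : Decidable (Spec_detect_consecutive_py vols out) := by unfold Spec_detect_consecutive_py; infer_instance

-- ===== CLAIM (what is proved, stated in full; the proofs are below) =====
def Claim_equal_detect_consecutive_py : Prop := ∀ (vols : List Int), Dom_detect_consecutive_py vols → Spec_detect_consecutive_py vols (detect_consecutive_py vols)

-- ===== LEMMAS AND PROOFS =====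

-- Length (as an Int) of the trailing run of strictly dir-monotone adjacent pairs, looking
-- downward from index i (pair (i, i-1) first).
def cnt (vols : List Int) (dir : Int) : Nat → Int
  | 0 => 0
  | i + 1 => if 0 < (vols.getD (i + 1) 0 - vols.getD i 0) * dir then 1 + cnt vols dir i else 0

theorem loopA_pos (vols : List Int) (i : Nat) (c : Int) (hc : 0 < c) :
    loopA vols i c = c + cnt vols 1 i := by
  induction i generalizing c with
  | zero => simp [loopA, cnt]
  | succ i ih =>
    simp only [loopA, cnt, mul_one]
    rcases lt_trichotomy (vols.getD i 0) (vols.getD (i + 1) 0) with h | h | h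
    · rw [if_pos h, if_pos (le_of_lt hc), if_pos (by omega), ih (c + 1) (by omega)]
      ring
    · rw [if_neg (by omega), if_neg (by omega), if_neg (by omega)]; omega
    · rw [if_neg (by omega), if_pos (by omega), if_neg (by omega), if_neg (by omega)]; omega

theorem loopA_neg (vols : List Int) (i : Nat) (c : Int) (hc : c < 0) :
    loopA vols i c = c - cnt vols (-1) i := by
  induction i generalizing c with
  | zero => simp [loopA, cnt]
  | succ i ih =>
    simp only [loopA, cnt]
    rcases lt_trichotomy (vols.getD i 0) (vols.getD (i + 1) 0) with h | h | h
    · rw [if_pos h, if_neg (by omega), if_neg (by nlinarith)]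
      ring
    · rw [if_neg (by omega), if_neg (by omega), if_neg (by omega)]
      ring
    · rw [if_neg (by omega), if_pos (by omega), if_pos (le_of_lt hc),
        if_pos (by nlinarith), ih (c - 1) (by omega)]
      ring

-- Characterisation of A on lists of length ≥ 2.
theorem A_char (vols : List Int) (m : Nat) (hl : vols.length = m + 2) :
    detect_consecutive_py vols =
      (if vols.getD m 0 < vols.getD (m + 1) 0 then 1 + cnt vols 1 m
       else if vols.getD (m + 1) 0 < vols.getD m 0 then -(1 + cnt vols (-1) m)
       else 0) := by
  unfold detect_consecutive_py
  rw [if_neg (by omega), show vols.length - 1 = m + 1 by omega]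
  simp only [loopA]
  rcases lt_trichotomy (vols.getD m 0) (vols.getD (m + 1) 0) with h | h | h
  · rw [if_pos h, if_pos h, if_pos le_rfl, loopA_pos vols m (0 + 1) (by omega)]
    ring
  · rw [if_neg (by omega), if_neg (by omega), if_neg (by omega), if_neg (by omega)]
  · rw [if_neg (by omega), if_pos (by omega), if_pos le_rfl, if_neg (by omega), if_pos (by omega),
      loopA_neg vols m (0 - 1) (by omega)]
    ring

theorem pairs_concat (v : List Int) (x : Int) (h : v ≠ []) :
    ((v ++ [x]).zip ((v ++ [x]).drop 1)) =
      v.zip (v.drop 1) ++ [(v.getD (v.length - 1) 0, x)] := by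
  induction v with
  | nil => exact absurd rfl h
  | cons a t ih =>
    cases t with
    | nil => rfl
    | cons b u =>
      have := ih (by simp)
      simp only [List.cons_append, List.drop_succ_cons, List.drop_zero] at this ⊢
      simp [this, List.zip_cons_cons]
      rfl

theorem cnt_congr (v : List Int) (x dir : Int) (i : Nat) (hi : i < v.length) :
    cnt (v ++ [x]) dir i = cnt v dir i := by
  induction i with
  | zero => rfl
  | succ i ih =>
    simp only [cnt, List.getD_append _ _ _ _ (by omega : i + 1 < v.length),
      List.getD_append _ _ _ _ (by omega : i < v.length), ih (by omega)]

-- Characterisation of B's fold on lists of length ≥ 2.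
set_option maxHeartbeats 1000000 in
theorem fold_char (vols : List Int) : ∀ (m : Nat), vols.length = m + 2 →
    (vols.zip (vols.drop 1)).foldl stepB (0, 0) =
      (if vols.getD m 0 < vols.getD (m + 1) 0 then (1 + cnt vols 1 m, 1)
       else if vols.getD (m + 1) 0 < vols.getD m 0 then (1 + cnt vols (-1) m, -1)
       else (0, 0)) := by
  induction vols using List.reverseRecOn with
  | nil => intro m hm; simp at hm
  | append_singleton v x ih =>
    intro m hm
    have hv : v.length = m + 1 := by simpa using hm
    cases m with
    | zero =>
      obtain ⟨a, rfl⟩ := List.length_eq_one_iff.mp hv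
      simp only [List.cons_append, List.nil_append, List.drop_succ_cons, List.drop_zero,
        List.zip_cons_cons, List.zip_nil_left, List.foldl_cons, List.foldl_nil, stepB, cnt]
      rcases lt_trichotomy a x with h | h | h <;>
        simp_all <;> split_ifs <;> simp_all <;> first | omega | (constructor <;> linarith) | linarith
    | succ k =>
      have hvne : v ≠ [] := by intro h; simp [h] at hv
      rw [pairs_concat v x hvne, List.foldl_append, ih k (by omega)]
      have hL1 : v.length - 1 = k + 1 := by omega
      have g1 : (v ++ [x]).getD (k + 1) 0 = v.getD (k + 1) 0 :=
        List.getD_append _ _ _ _ (by omega)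
      have g0 : (v ++ [x]).getD k 0 = v.getD k 0 :=
        List.getD_append _ _ _ _ (by omega)
      have g2 : (v ++ [x]).getD (k + 1 + 1) 0 = x := by
        rw [show k + 1 + 1 = v.length + 0 by omega]; simp
      have c0 : cnt (v ++ [x]) 1 k = cnt v 1 k := cnt_congr v x 1 k (by omega)
      have cm0 : cnt (v ++ [x]) (-1) k = cnt v (-1) k := cnt_congr v x (-1) k (by omega)
      rw [hL1]
      clear ih hm
      -- new top pair is (v[k+1], x); old top pair is (v[k], v[k+1])
      rcases lt_trichotomy (v.getD (k + 1) 0) x with hnew | hnew | hnew <;>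
        rcases lt_trichotomy (v.getD k 0) (v.getD (k + 1) 0) with hold | hold | hold <;>
        simp only [List.foldl_cons, List.foldl_nil, stepB, cnt, g1, g0, g2, c0, cm0, hnew, hold] <;>
        split_ifs <;> simp_all <;>
        first | omega | linarith | (constructor <;> linarith)

-- ===== VERDICT (by name: the statement is the Claim_ definition above) =====
theorem detect_consecutive_py_spec : Claim_equal_detect_consecutive_py := by
  intro vols _
  unfold Spec_detect_consecutive_py detect_consecutive_py_alt
  by_cases hlen : vols.length < 2
  · interval_cases h : vols.length
    · obtain rfl := List.length_eq_zero_iff.mp h; rfl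
    · obtain ⟨a, rfl⟩ := List.length_eq_one_iff.mp h; rfl
  · obtain ⟨m, hm⟩ : ∃ m, vols.length = m + 2 := ⟨vols.length - 2, by omega⟩
    rw [A_char vols m hm, fold_char vols m hm]
    split_ifs <;> ring
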